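-- pv_equiv track=rewrite | github.com/MRiabov/documentation-qa-backend | app/regions.py | fenced_code_spans
-- ===== SOURCE A (Python) =====
-- from typing import List, Tuple
--
-- Span = Tuple[int, int]  # [start, end)
--
-- def _merge_spans(spans: List[Span]) -> List[Span]:
--     if not spans:
--         return []
--     spans.sort(key=lambda x: x[0])
--     merged: List[Span] = []
--     cur_start, cur_end = spans[0]
--     for s, e in spans[1:]:
--         if s <= cur_end:  # overlap or touch
--             cur_end = max(cur_end, e)
--         else:
--             merged.append((cur_start, cur_end))
--             cur_start, cur_end = s, e
--     merged.append((cur_start, cur_end))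
--     return merged
--
-- def fenced_code_spans(text: str) -> List[Span]:
--     """Return spans for triple-backtick fenced blocks, inclusive of fence lines."""
--     spans: List[Span] = []
--     pos = 0
--     lines = text.splitlines(keepends=True)
--     inside = False
--     start_pos = -1
--     for line in lines:
--         stripped = line.lstrip()
--         if not inside:
--             fence_idx = stripped.find("```")
--             if fence_idx == 0:
--                 inside = True
--                 # compute absolute index of the first backtick in this line
--                 start_pos = pos + (len(line) - len(stripped)) + fence_idx
--         else:
--             fence_idx = stripped.find("```")
--             if fence_idx == 0:
--                 # include the entire closing fence line
--                 end_pos = pos + len(line)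
--                 spans.append((start_pos, end_pos))
--                 inside = False
--                 start_pos = -1
--         pos += len(line)
--     # if unclosed fence, treat rest of file as fenced
--     if inside and start_pos != -1:
--         spans.append((start_pos, len(text)))
--     return _merge_spans(spans)
-- ===== SOURCE B (Python) =====
-- from typing import List, Tuple
--
-- Span = Tuple[int, int]  # [start, end)
--
-- def _merge_spans(spans: List[Span]) -> List[Span]:
--     if not spans:
--         return []
--     spans.sort(key=lambda x: x[0])
--     merged: List[Span] = []
--     cur_start, cur_end = spans[0]
--     for s, e in spans[1:]:
--         if s <= cur_end:  # overlap or touch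
--             cur_end = max(cur_end, e)
--         else:
--             merged.append((cur_start, cur_end))
--             cur_start, cur_end = s, e
--     merged.append((cur_start, cur_end))
--     return merged
--
-- def _pair(fences: List[Span], text_len: int) -> List[Span]:
--     # pair fence lines in order: 0th opens, 1st closes, ...; odd leftover runs to EOF
--     if not fences:
--         return []
--     if len(fences) == 1:
--         return [(fences[0][0], text_len)]
--     return [(fences[0][0], fences[1][1])] + _pair(fences[2:], text_len)
--
-- def fenced_code_spans(text: str) -> List[Span]:
--     """Return spans for triple-backtick fenced blocks, inclusive of fence lines."""
--     fences: List[Span] = []  # (index of first backtick, end of that line)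
--     pos = 0
--     for line in text.splitlines(keepends=True):
--         stripped = line.lstrip()
--         if stripped.startswith("```"):
--             fences.append((pos + len(line) - len(stripped), pos + len(line)))
--         pos += len(line)
--     return _merge_spans(_pair(fences, len(text)))
-- ===== Notes on version B (the rewrite author's own statement) =====
-- stated objective: simpler
-- what changed: Instead of a stateful inside/start_pos toggle scan, B collects all fence-line offsets in one pass and then pairs them open/close in order (odd leftover runs to end of text), keeping the same merge helper.
import Mathlib
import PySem

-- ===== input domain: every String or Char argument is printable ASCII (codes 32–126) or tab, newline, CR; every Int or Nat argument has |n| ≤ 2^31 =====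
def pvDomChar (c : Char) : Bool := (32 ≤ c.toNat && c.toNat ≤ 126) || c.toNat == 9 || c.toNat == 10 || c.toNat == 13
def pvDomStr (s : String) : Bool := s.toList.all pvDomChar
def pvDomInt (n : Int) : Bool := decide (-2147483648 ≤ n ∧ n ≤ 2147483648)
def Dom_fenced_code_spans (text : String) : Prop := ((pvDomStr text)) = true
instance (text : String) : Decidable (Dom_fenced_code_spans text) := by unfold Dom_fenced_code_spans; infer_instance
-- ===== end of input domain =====

-- B: one pass collects the fence lines (start-of-backticks, end-of-line), then pairs them
-- open/close in order (odd leftover runs to end of text); same merge helper; objective: simpler decomposition.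

-- ===== PORT A =====

-- text.splitlines(keepends=True), hand-ported; exact on the Dom alphabet (the only line
-- boundaries Dom admits are '\n', '\r', '\r\n')
def pvSplitKeep (acc : List Char) : List Char → List (List Char)
  | [] => if acc = [] then [] else [acc.reverse]
  | '\r' :: '\n' :: r => (acc.reverse ++ ['\r', '\n']) :: pvSplitKeep [] r
  | '\r' :: r => (acc.reverse ++ ['\r']) :: pvSplitKeep [] r
  | '\n' :: r => (acc.reverse ++ ['\n']) :: pvSplitKeep [] r
  | c :: r => pvSplitKeep (c :: acc) r

def pvLines (cs : List Char) : List (List Char) := pvSplitKeep [] cs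

def pvFence : List Char := ['`', '`', '`']

-- port of _merge_spans (shared helper of A and B)
def pvMerge (spans : List (Int × Int)) : List (Int × Int) :=
  match PySem.List.sorted spans (fun x => x.1) false with
  | [] => []
  | f :: rest =>
    let fin := rest.foldl (fun (st : List (Int × Int) × Int × Int) (p : Int × Int) =>
      if p.1 ≤ st.2.2 then (st.1, st.2.1, max st.2.2 p.2)
      else (st.1 ++ [(st.2.1, st.2.2)], p.1, p.2)) ([], f.1, f.2)
    fin.1 ++ [(fin.2.1, fin.2.2)]

-- A's loop body: state = (spans, pos, inside, start_pos)
def pvStepA (st : List (Int × Int) × Int × Bool × Int) (line : List Char) :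
    List (Int × Int) × Int × Bool × Int :=
  let stripped := PySem.Chars.lstrip line
  let fi := PySem.Chars.find stripped pvFence
  if !st.2.2.1 then
    if fi = 0 then
      (st.1, st.2.1 + line.length, true, st.2.1 + ((line.length : Int) - stripped.length) + fi)
    else (st.1, st.2.1 + line.length, st.2.2.1, st.2.2.2)
  else
    if fi = 0 then
      (st.1 ++ [(st.2.2.2, st.2.1 + line.length)], st.2.1 + line.length, false, -1)
    else (st.1, st.2.1 + line.length, st.2.2.1, st.2.2.2)

def fenced_code_spans (text : String) : List (Int × Int) :=
  let cs := text.toList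
  let fin := (pvLines cs).foldl pvStepA ([], 0, false, -1)
  let spans := if fin.2.2.1 && (fin.2.2.2 != -1) then fin.1 ++ [(fin.2.2.2, (cs.length : Int))]
               else fin.1
  pvMerge spans

-- ===== PORT B =====

-- B's first pass: state = (fences, pos); a fence line records (pos + leading ws, pos + len(line))
def pvStepB (st : List (Int × Int) × Int) (line : List Char) : List (Int × Int) × Int :=
  let stripped := PySem.Chars.lstrip line
  if PySem.Chars.startswith stripped pvFence then
    (st.1 ++ [(st.2 + (line.length : Int) - stripped.length, st.2 + line.length)],
     st.2 + line.length)
  else (st.1, st.2 + line.length)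

-- port of _pair
def pvPair (textLen : Int) : List (Int × Int) → List (Int × Int)
  | [] => []
  | [f] => [(f.1, textLen)]
  | f :: g :: r => (f.1, g.2) :: pvPair textLen r

def fenced_code_spans_alt (text : String) : List (Int × Int) :=
  let cs := text.toList
  let fin := (pvLines cs).foldl pvStepB ([], 0)
  pvMerge (pvPair (cs.length : Int) fin.1)

-- ===== PRECONDITION & SPEC =====
def Spec_fenced_code_spans (text : String) (out : List (Int × Int)) : Prop := out = fenced_code_spans_alt text
instance (text : String) (out : List (Int × Int)) : Decidable (Spec_fenced_code_spans text out) := by unfold Spec_fenced_code_spans; infer_instance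

-- ===== CLAIM (what is proved, stated in full; the proofs are below) =====
def Claim_equal_fenced_code_spans : Prop := ∀ (text : String), Dom_fenced_code_spans text → Spec_fenced_code_spans text (fenced_code_spans text)

-- ===== LEMMAS AND PROOFS =====

-- the fence lines of a line list, with their (start-of-backticks, end-of-line) offsets
def pvFencesOf : Int → List (List Char) → List (Int × Int)
  | _, [] => []
  | pos, l :: r =>
    let stripped := PySem.Chars.lstrip l
    if PySem.Chars.find stripped pvFence = 0 then
      (pos + ((l.length : Int) - stripped.length), pos + l.length) :: pvFencesOf (pos + l.length) r
    else pvFencesOf (pos + l.length) r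

-- what A's loop does to the fence list: closed pairs + trailing open state
def pvCont : Bool → Int → List (Int × Int) → List (Int × Int) × Bool × Int
  | false, st, [] => ([], false, st)
  | false, _, f :: r => pvCont true f.1 r
  | true, st, [] => ([], true, st)
  | true, st, f :: r =>
    let c := pvCont false (-1) r
    ((st, f.2) :: c.1, c.2)

def pvTot (lines : List (List Char)) : Int := ((lines.map List.length).sum : Nat)

theorem pv_find_zero_iff (s pat : List Char) :
    PySem.Chars.find s pat = 0 ↔ PySem.Chars.startswith s pat = true := by
  constructor
  · intro h
    have h0 : (0 : Int) ≤ PySem.Chars.find s pat := by omega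
    have := (PySem.Chars.find_spec h0).1
    rw [h] at this
    simpa [PySem.Chars.startswith_iff] using this
  · intro h
    have hpre : pat <+: s := (PySem.Chars.startswith_iff s pat).1 h
    have h0 : (0 : Int) ≤ PySem.Chars.find s pat := by
      rw [PySem.Chars.find_nonneg_iff]
      exact hpre.isInfix
    by_contra hne
    have hpos : 0 < (PySem.Chars.find s pat).toNat := by omega
    exact (PySem.Chars.find_spec h0).2 0 hpos (by simpa using hpre)

theorem pv_loopB_spec (lines : List (List Char)) :
    ∀ fs pos, lines.foldl pvStepB (fs, pos) = (fs ++ pvFencesOf pos lines, pos + pvTot lines) := by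
  induction lines with
  | nil => intro fs pos; simp [pvFencesOf, pvTot]
  | cons l r ih =>
    intro fs pos
    have hsum : pvTot (l :: r) = (l.length : Int) + pvTot r := by
      simp only [pvTot, List.map_cons, List.sum_cons]
      push_cast
      ring
    by_cases hf : PySem.Chars.find (PySem.Chars.lstrip l) pvFence = 0
    · have hs : PySem.Chars.startswith (PySem.Chars.lstrip l) pvFence = true :=
        (pv_find_zero_iff _ _).1 hf
      have harg : pos + (l.length : Int) - (PySem.Chars.lstrip l).length =
          pos + ((l.length : Int) - (PySem.Chars.lstrip l).length) := by ring
      simp only [List.foldl_cons, pvStepB, hs, if_true, harg, ih, pvFencesOf, hf, hsum,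
        Prod.mk.injEq]
      exact ⟨by simp, by ring⟩
    · have hs : PySem.Chars.startswith (PySem.Chars.lstrip l) pvFence = false :=
        Bool.eq_false_iff.mpr (fun h => hf ((pv_find_zero_iff _ _).2 h))
      simp only [List.foldl_cons, pvStepB, hs, Bool.false_eq_true, if_false, ih, pvFencesOf, hf,
        hsum, Prod.mk.injEq]
      exact ⟨by simp, by ring⟩

theorem pv_loopA_spec (lines : List (List Char)) :
    ∀ spans pos b st, lines.foldl pvStepA (spans, pos, b, st) =
      (spans ++ (pvCont b st (pvFencesOf pos lines)).1, pos + pvTot lines,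
       (pvCont b st (pvFencesOf pos lines)).2) := by
  induction lines with
  | nil =>
    intro spans pos b st
    cases b <;> simp [pvFencesOf, pvCont, pvTot]
  | cons l r ih =>
    intro spans pos b st
    have hsum : pvTot (l :: r) = (l.length : Int) + pvTot r := by
      simp only [pvTot, List.map_cons, List.sum_cons]
      push_cast
      ring
    by_cases hf : PySem.Chars.find (PySem.Chars.lstrip l) pvFence = 0
    · cases b with
      | false =>
        simp only [List.foldl_cons, pvStepA, hf, if_true, Bool.not_false, ih,
          pvFencesOf, pvCont, hsum, add_zero, Prod.mk.injEq]
        exact ⟨by simp, by ring, by simp⟩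
      | true =>
        simp only [List.foldl_cons, pvStepA, hf, if_true, Bool.not_true, Bool.false_eq_true,
          ite_false, ih, pvFencesOf, pvCont, hsum, Prod.mk.injEq]
        exact ⟨by simp, by ring, by simp⟩
    · cases b with
      | false =>
        simp only [List.foldl_cons, pvStepA, hf, if_false, Bool.not_false, ite_true, ih,
          pvFencesOf, hsum, Prod.mk.injEq]
        exact ⟨by simp, by ring, by simp⟩
      | true =>
        simp only [List.foldl_cons, pvStepA, hf, if_false, Bool.not_true, Bool.false_eq_true,
          ih, pvFencesOf, hsum, Prod.mk.injEq]
        exact ⟨by simp, by ring, by simp⟩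

theorem pv_fences_nonneg (lines : List (List Char)) :
    ∀ pos, 0 ≤ pos → ∀ p ∈ pvFencesOf pos lines, 0 ≤ p.1 := by
  induction lines with
  | nil => intro pos _ p hp; simp [pvFencesOf] at hp
  | cons l r ih =>
    intro pos hpos p hp
    have hlen : (PySem.Chars.lstrip l).length ≤ l.length := by
      simp [PySem.Chars.lstrip]
      exact List.length_dropWhile_le _ _
    by_cases hf : PySem.Chars.find (PySem.Chars.lstrip l) pvFence = 0 <;>
      simp only [pvFencesOf, hf, if_true, if_false, List.mem_cons] at hp
    · rcases hp with h | h
      · subst h; simp; omega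
      · exact ih (pos + l.length) (by positivity) p h
    · exact ih (pos + l.length) (by positivity) p hp

theorem pv_pair_final (L : Int) :
    ∀ F : List (Int × Int), (∀ p ∈ F, (0:Int) ≤ p.1) →
      (if (pvCont false (-1) F).2.1 && ((pvCont false (-1) F).2.2 != -1) then
        (pvCont false (-1) F).1 ++ [((pvCont false (-1) F).2.2, L)]
       else (pvCont false (-1) F).1) = pvPair L F
  | [], _ => by simp [pvCont, pvPair]
  | [f], h => by
    have hf : (0:Int) ≤ f.1 := h f (by simp)
    have : (f.1 != -1) = true := by simp; omega
    simp [pvCont, pvPair, this]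
  | f :: g :: r, h => by
    have ih := pv_pair_final L r (fun p hp => h p (by simp [hp]))
    simp only [pvCont, pvPair]
    split_ifs with hb <;> simp_all

theorem fenced_code_spans_spec : Claim_equal_fenced_code_spans := by
  unfold Claim_equal_fenced_code_spans
  intro text _
  unfold Spec_fenced_code_spans fenced_code_spans fenced_code_spans_alt
  simp only [pv_loopA_spec, pv_loopB_spec, List.nil_append]
  rw [pv_pair_final ((text.toList.length : Nat) : Int) (pvFencesOf 0 (pvLines text.toList))
    (pv_fences_nonneg (pvLines text.toList) 0 le_rfl)]
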